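-- pv_equiv track=rewrite | github.com/ShuvalovAnthony/ez_python | Katia/5/59741.py | check
-- ===== SOURCE A (Python) =====
-- def check(num: str):
--     if num[0] == "0": return False
--     if len(set(num)) != len(num): return False
--
--     for i in "246":
--         num = num.replace(i, '0')
--     for i in "357":
--         num = num.replace(i, '1')
--
--     if ("00" in num) or ("11" in num): return False
--
--     return True
-- ===== SOURCE B (Python) =====
-- def check(num: str):
--     if num.startswith("0"): return False
--     if len(set(num)) != len(num): return False
--     return all(not (a in "0246" and b in "0246") and
--                not (a in "1357" and b in "1357")
--                for a, b in zip(num, num[1:]))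
-- ===== Notes on version B (the rewrite author's own statement) =====
-- stated objective: simpler
-- what changed: Replaces the two replace-loops (which rewrite the whole string six times) and the double-zero/double-one substring searches with a single pass over adjacent character pairs, rejecting a pair when both characters are even digits below eight or both are odd digits below nine (so eight and nine stay exempt, exactly as in A).
-- outside the precondition, e.g. on check(''): A raises IndexError, B returns True
import Mathlib
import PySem

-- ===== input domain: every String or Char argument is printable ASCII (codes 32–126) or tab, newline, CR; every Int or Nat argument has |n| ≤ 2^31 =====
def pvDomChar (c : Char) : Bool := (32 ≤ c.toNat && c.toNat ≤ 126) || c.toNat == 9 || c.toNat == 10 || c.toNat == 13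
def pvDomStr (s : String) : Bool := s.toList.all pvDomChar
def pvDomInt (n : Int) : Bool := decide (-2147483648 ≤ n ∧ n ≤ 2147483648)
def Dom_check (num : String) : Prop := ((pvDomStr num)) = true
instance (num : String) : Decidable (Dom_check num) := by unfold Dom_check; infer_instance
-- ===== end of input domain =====

-- Program B replaces A's six whole-string replace passes and the "00"/"11" substring
-- searches with one pass over adjacent character pairs (objective: simpler).


-- ===== PORT A =====
def check (num : String) : Bool :=
  if PySem.Str.pyGet? num 0 == some '0' then false
  else if (PySem.Set.ofList num.toList).length != PySem.Str.len num then false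
  else
    -- for i in "246": num = num.replace(i, '0')
    let num1 := "246".toList.foldl (fun s i => PySem.Str.replace s (String.ofList [i]) "0") num
    -- for i in "357": num = num.replace(i, '1')
    let num2 := "357".toList.foldl (fun s i => PySem.Str.replace s (String.ofList [i]) "1") num1
    if PySem.Str.isIn "00" num2 || PySem.Str.isIn "11" num2 then false
    else true

-- ===== PORT B =====
def check_alt (num : String) : Bool :=
  if PySem.Str.startswith num "0" then false
  else if (PySem.Set.ofList num.toList).length != PySem.Str.len num then false
  else
    -- all(... for a, b in zip(num, num[1:])); for a single character a, Python's
    -- `a in "0246"` is exactly char membership, ported as List.contains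
    (num.toList.zip (PySem.Str.slice num (some 1) none).toList).all fun p =>
      !("0246".toList.contains p.1 && "0246".toList.contains p.2) &&
      !("1357".toList.contains p.1 && "1357".toList.contains p.2)

-- ===== PRECONDITION & SPEC =====
-- Pre_ excludes only the empty string, on which A's num[0] raises IndexError.
def Pre_check (num : String) : Prop := num ≠ ""
instance (num : String) : Decidable (Pre_check num) := by unfold Pre_check; infer_instance
def pvWitness_check : String := "12"

def Spec_check (num : String) (out : Bool) : Prop := out = check_alt num
instance (num : String) (out : Bool) : Decidable (Spec_check num out) := by unfold Spec_check; infer_instance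

-- ===== CLAIM (what is proved, stated in full; the proofs are below) =====
def Claim_equal_check : Prop := ∀ (num : String), Dom_check num → Pre_check num → Spec_check num (check num)

-- ===== LEMMAS AND PROOFS =====

-- replacing a single-character pattern is a character map
theorem replace_go_single (c d : Char) :
    ∀ (l acc : List Char), PySem.Chars.replace.go [c] [d] l.length l acc
      = acc.reverse ++ l.map (fun x => if x = c then d else x) := by
  intro l
  induction l with
  | nil => intro acc; simp [PySem.Chars.replace.go]
  | cons a t ih =>
    intro acc
    simp only [List.length_cons, PySem.Chars.replace.go, List.isPrefixOf, List.map_cons]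
    by_cases h : a = c
    · simp [h, ih, List.drop]
    · have hb : (c == a) = false := beq_eq_false_iff_ne.mpr (fun e => h e.symm)
      simp [hb, ih, h]

theorem replace_single (s : List Char) (c d : Char) :
    PySem.Chars.replace s [c] [d] = s.map (fun x => if x = c then d else x) := by
  have := replace_go_single c d s []
  simpa [PySem.Chars.replace] using this

-- the composite of A's six single-char replaces, as one map
def gmap (x : Char) : Char :=
  if x = '2' ∨ x = '4' ∨ x = '6' then '0'
  else if x = '3' ∨ x = '5' ∨ x = '7' then '1' else x

theorem folds_eq_map (num : String) :
    ("357".toList.foldl (fun s i => PySem.Str.replace s (String.ofList [i]) "1")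
      ("246".toList.foldl (fun s i => PySem.Str.replace s (String.ofList [i]) "0") num)).toList
    = num.toList.map gmap := by
  simp only [show "357".toList = ['3','5','7'] from rfl,
    show "246".toList = ['2','4','6'] from rfl, List.foldl]
  simp only [PySem.Str.replace, String.toList_ofList,
    show ("0" : String).toList = ['0'] from rfl, show ("1" : String).toList = ['1'] from rfl,
    replace_single, List.map_map]
  apply List.map_congr_left
  intro x _
  simp only [Function.comp, gmap]
  by_cases h2 : x = '2' <;> by_cases h3 : x = '3' <;> by_cases h4 : x = '4' <;>
    by_cases h5 : x = '5' <;> by_cases h6 : x = '6' <;> by_cases h7 : x = '7' <;>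
    simp_all

-- [x, y] is an infix of l iff (x, y) is an adjacent pair of l
theorem infix_pair_iff (x y : Char) :
    ∀ (l : List Char), [x, y] <:+: l ↔ (x, y) ∈ l.zip l.tail := by
  intro l
  induction l with
  | nil => simp
  | cons a t ih =>
    rw [List.infix_cons_iff, ih]
    cases t with
    | nil => simp
    | cons b t' =>
      simp only [List.tail_cons, List.zip_cons_cons, List.mem_cons, List.cons_prefix_cons,
        List.nil_prefix, and_true, Prod.mk.injEq]

theorem gmap_eq_zero_iff (x : Char) : gmap x = '0' ↔ ("0246".toList.contains x = true) := by
  simp only [gmap, show "0246".toList = ['0','2','4','6'] from rfl, List.contains_cons]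
  by_cases h0 : x = '0' <;> by_cases h2 : x = '2' <;> by_cases h3 : x = '3' <;>
    by_cases h4 : x = '4' <;> by_cases h5 : x = '5' <;> by_cases h6 : x = '6' <;>
    by_cases h7 : x = '7' <;> simp_all

theorem gmap_eq_one_iff (x : Char) : gmap x = '1' ↔ ("1357".toList.contains x = true) := by
  simp only [gmap, show "1357".toList = ['1','3','5','7'] from rfl, List.contains_cons]
  by_cases h1 : x = '1' <;> by_cases h2 : x = '2' <;> by_cases h3 : x = '3' <;>
    by_cases h4 : x = '4' <;> by_cases h5 : x = '5' <;> by_cases h6 : x = '6' <;>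
    by_cases h7 : x = '7' <;> simp_all

-- core equivalence: A's substring tests on the mapped string vs B's pair pass
theorem core_eq (cs : List Char) :
    (PySem.Chars.isIn ['0','0'] (cs.map gmap) || PySem.Chars.isIn ['1','1'] (cs.map gmap)) =
      !((cs.zip cs.tail).all fun p =>
        !("0246".toList.contains p.1 && "0246".toList.contains p.2) &&
        !("1357".toList.contains p.1 && "1357".toList.contains p.2)) := by
  have hz : (cs.map gmap).zip ((cs.map gmap).tail)
      = (cs.zip cs.tail).map (Prod.map gmap gmap) := by
    rw [← List.map_tail, List.zip_map]
  have hL : (PySem.Chars.isIn ['0','0'] (cs.map gmap)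
        || PySem.Chars.isIn ['1','1'] (cs.map gmap)) = true
      ↔ ∃ p ∈ cs.zip cs.tail,
          ("0246".toList.contains p.1 = true ∧ "0246".toList.contains p.2 = true) ∨
          ("1357".toList.contains p.1 = true ∧ "1357".toList.contains p.2 = true) := by
    rw [Bool.or_eq_true, PySem.Chars.isIn_iff_infix, PySem.Chars.isIn_iff_infix,
      infix_pair_iff, infix_pair_iff, hz]
    simp only [List.mem_map]
    constructor
    · rintro (⟨p, hp, he⟩ | ⟨p, hp, he⟩) <;>
        simp only [Prod.ext_iff, Prod.map_fst, Prod.map_snd] at he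
      · exact ⟨p, hp, Or.inl ⟨(gmap_eq_zero_iff _).1 he.1, (gmap_eq_zero_iff _).1 he.2⟩⟩
      · exact ⟨p, hp, Or.inr ⟨(gmap_eq_one_iff _).1 he.1, (gmap_eq_one_iff _).1 he.2⟩⟩
    · rintro ⟨p, hp, (⟨h1, h2⟩ | ⟨h1, h2⟩)⟩
      · exact Or.inl ⟨p, hp, by
          simp only [Prod.ext_iff, Prod.map_fst, Prod.map_snd]
          exact ⟨(gmap_eq_zero_iff _).2 h1, (gmap_eq_zero_iff _).2 h2⟩⟩
      · exact Or.inr ⟨p, hp, by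
          simp only [Prod.ext_iff, Prod.map_fst, Prod.map_snd]
          exact ⟨(gmap_eq_one_iff _).2 h1, (gmap_eq_one_iff _).2 h2⟩⟩
  cases hB : ((cs.zip cs.tail).all fun p =>
      !("0246".toList.contains p.1 && "0246".toList.contains p.2) &&
      !("1357".toList.contains p.1 && "1357".toList.contains p.2)) with
  | false =>
    rw [Bool.not_false]
    obtain ⟨p, hp, hnp⟩ := List.all_eq_false.1 hB
    simp only [Bool.and_eq_true, Bool.not_eq_true'] at hnp
    apply hL.2
    rcases not_and_or.1 hnp with h | h
    · have h' : ("0246".toList.contains p.1 && "0246".toList.contains p.2) = true := by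
        revert h; cases ("0246".toList.contains p.1 && "0246".toList.contains p.2) <;> simp
      exact ⟨p, hp, Or.inl (by simpa using h')⟩
    · have h' : ("1357".toList.contains p.1 && "1357".toList.contains p.2) = true := by
        revert h; cases ("1357".toList.contains p.1 && "1357".toList.contains p.2) <;> simp
      exact ⟨p, hp, Or.inr (by simpa using h')⟩
  | true =>
    rw [Bool.not_true, Bool.eq_false_iff]
    intro h
    obtain ⟨p, hp, hdisj⟩ := hL.1 h
    have := List.all_eq_true.1 hB p hp
    simp only [Bool.and_eq_true, Bool.not_eq_true', Bool.and_eq_false_iff] at this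
    rcases hdisj with ⟨h1, h2⟩ | ⟨h1, h2⟩
    · rcases this.1 with hc | hc <;> simp_all
    · rcases this.2 with hc | hc <;> simp_all

-- ===== VERDICT (by name: the statement is the Claim_ definition above) =====
theorem check_spec : Claim_equal_check := by
  intro num _ hpre
  unfold Spec_check check check_alt
  have hne : num.toList ≠ [] := fun hl => hpre (String.toList_eq_nil_iff.mp hl)
  obtain ⟨a, t, hat⟩ := List.exists_cons_of_ne_nil hne
  -- head test: num[0] == "0"  vs  num.startswith("0")
  have h1 : PySem.Str.pyGet? num 0 = some a := by
    simp [PySem.Str.pyGet?, PySem.Chars.pyGet?, PySem.List.pyGet?, PySem.List.pyIdx?, hat]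
  have h2 : PySem.Str.startswith num "0" = (a == '0') := by
    simp only [PySem.Str.startswith_eq, show ("0" : String).toList = ['0'] from rfl, hat]
    by_cases ha : a = '0'
    · subst ha
      have := (PySem.Chars.startswith_iff ('0' :: t) ['0']).2 ⟨t, rfl⟩
      simp [this]
    · have hf : PySem.Chars.startswith (a :: t) ['0'] = false := by
        rw [Bool.eq_false_iff]
        intro h
        obtain ⟨u, hu⟩ := (PySem.Chars.startswith_iff _ _).1 h
        simp only [List.cons_append, List.nil_append, List.cons.injEq] at hu
        exact ha hu.1.symm
      simp [hf, ha]
  have hhead : (PySem.Str.pyGet? num 0 == some '0') = PySem.Str.startswith num "0" := by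
    rw [h1, h2]; simp
  rw [hhead]
  by_cases hc1 : PySem.Str.startswith num "0" = true
  · rw [if_pos hc1, if_pos hc1]
  · rw [if_neg hc1, if_neg hc1]
    by_cases hc2 : ((PySem.Set.ofList num.toList).length != PySem.Str.len num) = true
    · rw [if_pos hc2, if_pos hc2]
    · rw [if_neg hc2, if_neg hc2]
      dsimp only
      have hiso : ∀ (sub : String),
          PySem.Str.isIn sub
            ("357".toList.foldl (fun s i => PySem.Str.replace s (String.ofList [i]) "1")
              ("246".toList.foldl (fun s i => PySem.Str.replace s (String.ofList [i]) "0") num))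
          = PySem.Chars.isIn sub.toList (num.toList.map gmap) := by
        intro sub
        rw [PySem.Str.isIn_eq, folds_eq_map]
      rw [hiso "00", hiso "11",
        show ("00" : String).toList = ['0','0'] from rfl,
        show ("11" : String).toList = ['1','1'] from rfl]
      have hslice : (PySem.Str.slice num (some 1) none).toList = num.toList.tail := by
        simp [PySem.Str.toList_slice, PySem.List.slice_from, List.drop_one]
      rw [hslice, core_eq num.toList]
      cases hall : ((num.toList.zip num.toList.tail).all fun p =>
        !("0246".toList.contains p.1 && "0246".toList.contains p.2) &&
        !("1357".toList.contains p.1 && "1357".toList.contains p.2))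
      · rfl
      · rfl
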